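-- pv_equiv track=rewrite | github.com/LibRapid/librapid | src/librapid/python/typeMapping.py | mapType
-- ===== SOURCE A (Python) =====
-- typeMap = {
-- 	"ArrayB" : ("b", "bool", "boolean"),
-- 	"ArrayC" : ("c", "char", "byte", "character"),
-- 	"ArrayF16" : ("half", "float16", "f16"),
-- 	"ArrayF32" : ("float", "float32", "f32", "default", None),
-- 	"ArrayF64" : ("double", "float64", "f64"),
-- 	"ArrayI16" : ("short", "int16", "i16"),
-- 	"ArrayI32" : ("int", "long", "int32", "i32"),
-- 	"ArrayI64" : ("long long", "int64", "i64"),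
-- 	"ArrayMPZ" : ("bigint", "mpz", "mpz_t", "mpz_class", "mpir_int"),
-- 	"ArrayMPQ" : ("bigrational", "mpq", "mpq_t", "mpq_class", "mpir_rational"),
-- 	"ArrayMPFR" : ("bigfloat", "mpfr", "mpreal", "mpfr_float"),
-- 	"ArrayCF32" : ("complex float", "cfloat", "cf32", "c32"),
-- 	"ArrayCF64" : ("compled double", "cdouble", "cf64", "c64"),
-- 	"ArrayCMPFR" : ("complex multiprecision", "complex multiprec", "cmpfr", "cmpf", "cmp")
-- }
--
-- deviceMap = {
-- 	"CPU" : ("cpu", "host", "default", None),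
-- 	"GPU" : ("gpu", "cuda", "device")
-- }
--
-- def mapType(type:str = None, device:str = None):
-- 	resType = None
-- 	resDevice = None
--
-- 	for key, val in typeMap.items():
-- 		if type in val:
-- 			resType = key
--
-- 	for key, val in deviceMap.items():
-- 		if device in val:
-- 			resDevice = key
--
-- 	return resType, resDevice
-- ===== SOURCE B (Python) =====
-- # Flat reverse-lookup tables (alias -> canonical Array key), written out directly:
-- # each call is two O(1) dict lookups instead of scanning every value tuple.
-- reverseType = {
-- 	"b": "ArrayB", "bool": "ArrayB", "boolean": "ArrayB",
-- 	"c": "ArrayC", "char": "ArrayC", "byte": "ArrayC", "character": "ArrayC",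
-- 	"half": "ArrayF16", "float16": "ArrayF16", "f16": "ArrayF16",
-- 	"float": "ArrayF32", "float32": "ArrayF32", "f32": "ArrayF32",
-- 	"default": "ArrayF32", None: "ArrayF32",
-- 	"double": "ArrayF64", "float64": "ArrayF64", "f64": "ArrayF64",
-- 	"short": "ArrayI16", "int16": "ArrayI16", "i16": "ArrayI16",
-- 	"int": "ArrayI32", "long": "ArrayI32", "int32": "ArrayI32", "i32": "ArrayI32",
-- 	"long long": "ArrayI64", "int64": "ArrayI64", "i64": "ArrayI64",
-- 	"bigint": "ArrayMPZ", "mpz": "ArrayMPZ", "mpz_t": "ArrayMPZ",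
-- 	"mpz_class": "ArrayMPZ", "mpir_int": "ArrayMPZ",
-- 	"bigrational": "ArrayMPQ", "mpq": "ArrayMPQ", "mpq_t": "ArrayMPQ",
-- 	"mpq_class": "ArrayMPQ", "mpir_rational": "ArrayMPQ",
-- 	"bigfloat": "ArrayMPFR", "mpfr": "ArrayMPFR", "mpreal": "ArrayMPFR",
-- 	"mpfr_float": "ArrayMPFR",
-- 	"complex float": "ArrayCF32", "cfloat": "ArrayCF32", "cf32": "ArrayCF32",
-- 	"c32": "ArrayCF32",
-- 	"compled double": "ArrayCF64", "cdouble": "ArrayCF64", "cf64": "ArrayCF64",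
-- 	"c64": "ArrayCF64",
-- 	"complex multiprecision": "ArrayCMPFR", "complex multiprec": "ArrayCMPFR",
-- 	"cmpfr": "ArrayCMPFR", "cmpf": "ArrayCMPFR", "cmp": "ArrayCMPFR",
-- }
--
-- reverseDevice = {
-- 	"cpu": "CPU", "host": "CPU", "default": "CPU", None: "CPU",
-- 	"gpu": "GPU", "cuda": "GPU", "device": "GPU",
-- }
--
-- def mapType(type:str = None, device:str = None):
-- 	return reverseType.get(type), reverseDevice.get(device)
-- ===== Notes on version B (the rewrite author's own statement) =====
-- stated objective: simpler
-- what changed: Replaces A's per-call last-match scan over both maps' value tuples with two flat reverse dicts (alias -> canonical key) written out once, so each call is two dict lookups; correct because no alias occurs under two keys.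
import Mathlib
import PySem

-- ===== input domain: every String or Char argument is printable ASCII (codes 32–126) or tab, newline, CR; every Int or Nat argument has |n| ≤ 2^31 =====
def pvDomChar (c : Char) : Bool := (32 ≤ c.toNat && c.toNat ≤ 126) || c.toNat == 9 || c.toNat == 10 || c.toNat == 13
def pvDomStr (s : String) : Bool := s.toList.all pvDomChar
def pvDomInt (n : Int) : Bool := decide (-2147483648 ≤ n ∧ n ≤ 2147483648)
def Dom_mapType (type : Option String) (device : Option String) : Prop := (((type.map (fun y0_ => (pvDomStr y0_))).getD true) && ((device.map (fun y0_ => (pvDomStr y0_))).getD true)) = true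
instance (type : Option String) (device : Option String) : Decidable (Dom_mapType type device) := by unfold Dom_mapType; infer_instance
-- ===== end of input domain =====

-- B replaces A's per-call scan over both maps' value tuples with two flat reverse dicts written out once (alias -> key); objective: simpler calls.

-- ===== PORT A =====
-- module-level constants typeMap / deviceMap (dict str -> tuple of optional strings; None is a tuple member)
def typeMapL : List (String × List (Option String)) :=
  [("ArrayB", [some "b", some "bool", some "boolean"]),
   ("ArrayC", [some "c", some "char", some "byte", some "character"]),
   ("ArrayF16", [some "half", some "float16", some "f16"]),
   ("ArrayF32", [some "float", some "float32", some "f32", some "default", none]),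
   ("ArrayF64", [some "double", some "float64", some "f64"]),
   ("ArrayI16", [some "short", some "int16", some "i16"]),
   ("ArrayI32", [some "int", some "long", some "int32", some "i32"]),
   ("ArrayI64", [some "long long", some "int64", some "i64"]),
   ("ArrayMPZ", [some "bigint", some "mpz", some "mpz_t", some "mpz_class", some "mpir_int"]),
   ("ArrayMPQ", [some "bigrational", some "mpq", some "mpq_t", some "mpq_class", some "mpir_rational"]),
   ("ArrayMPFR", [some "bigfloat", some "mpfr", some "mpreal", some "mpfr_float"]),
   ("ArrayCF32", [some "complex float", some "cfloat", some "cf32", some "c32"]),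
   ("ArrayCF64", [some "compled double", some "cdouble", some "cf64", some "c64"]),
   ("ArrayCMPFR", [some "complex multiprecision", some "complex multiprec", some "cmpfr", some "cmpf", some "cmp"])]

def deviceMapL : List (String × List (Option String)) :=
  [("CPU", [some "cpu", some "host", some "default", none]),
   ("GPU", [some "gpu", some "cuda", some "device"])]

-- A's loop: `for key, val in m.items(): if x in val: res = key` (last match wins, res starts as None)
def scanMap (m : List (String × List (Option String))) (x : Option String) : Option String :=
  m.foldl (fun r kv => if x ∈ kv.2 then some kv.1 else r) none

def mapType (type : Option String) (device : Option String) : Option String × Option String :=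
  (scanMap typeMapL type, scanMap deviceMapL device)

-- ===== PORT B =====
-- B has no typeMap/deviceMap: it carries two flat dict LITERALS alias -> canonical key
-- (Python dict literal with distinct keys = insertion-ordered assoc list; .get = first match)
def reverseTypeL : List (Option String × String) :=
  [(some "b", "ArrayB"),
   (some "bool", "ArrayB"),
   (some "boolean", "ArrayB"),
   (some "c", "ArrayC"),
   (some "char", "ArrayC"),
   (some "byte", "ArrayC"),
   (some "character", "ArrayC"),
   (some "half", "ArrayF16"),
   (some "float16", "ArrayF16"),
   (some "f16", "ArrayF16"),
   (some "float", "ArrayF32"),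
   (some "float32", "ArrayF32"),
   (some "f32", "ArrayF32"),
   (some "default", "ArrayF32"),
   (none, "ArrayF32"),
   (some "double", "ArrayF64"),
   (some "float64", "ArrayF64"),
   (some "f64", "ArrayF64"),
   (some "short", "ArrayI16"),
   (some "int16", "ArrayI16"),
   (some "i16", "ArrayI16"),
   (some "int", "ArrayI32"),
   (some "long", "ArrayI32"),
   (some "int32", "ArrayI32"),
   (some "i32", "ArrayI32"),
   (some "long long", "ArrayI64"),
   (some "int64", "ArrayI64"),
   (some "i64", "ArrayI64"),
   (some "bigint", "ArrayMPZ"),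
   (some "mpz", "ArrayMPZ"),
   (some "mpz_t", "ArrayMPZ"),
   (some "mpz_class", "ArrayMPZ"),
   (some "mpir_int", "ArrayMPZ"),
   (some "bigrational", "ArrayMPQ"),
   (some "mpq", "ArrayMPQ"),
   (some "mpq_t", "ArrayMPQ"),
   (some "mpq_class", "ArrayMPQ"),
   (some "mpir_rational", "ArrayMPQ"),
   (some "bigfloat", "ArrayMPFR"),
   (some "mpfr", "ArrayMPFR"),
   (some "mpreal", "ArrayMPFR"),
   (some "mpfr_float", "ArrayMPFR"),
   (some "complex float", "ArrayCF32"),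
   (some "cfloat", "ArrayCF32"),
   (some "cf32", "ArrayCF32"),
   (some "c32", "ArrayCF32"),
   (some "compled double", "ArrayCF64"),
   (some "cdouble", "ArrayCF64"),
   (some "cf64", "ArrayCF64"),
   (some "c64", "ArrayCF64"),
   (some "complex multiprecision", "ArrayCMPFR"),
   (some "complex multiprec", "ArrayCMPFR"),
   (some "cmpfr", "ArrayCMPFR"),
   (some "cmpf", "ArrayCMPFR"),
   (some "cmp", "ArrayCMPFR")]

def reverseDeviceL : List (Option String × String) :=
  [(some "cpu", "CPU"),
   (some "host", "CPU"),
   (some "default", "CPU"),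
   (none, "CPU"),
   (some "gpu", "GPU"),
   (some "cuda", "GPU"),
   (some "device", "GPU")]

def reverseType : PySem.Dict (Option String) String := PySem.Dict.mk reverseTypeL
def reverseDevice : PySem.Dict (Option String) String := PySem.Dict.mk reverseDeviceL

def mapType_alt (type : Option String) (device : Option String) : Option String × Option String :=
  (reverseType.get? type, reverseDevice.get? device)

-- ===== PRECONDITION & SPEC =====
def Spec_mapType (type : Option String) (device : Option String) (out : Option String × Option String) : Prop := out = mapType_alt type device
instance (type : Option String) (device : Option String) (out : Option String × Option String) : Decidable (Spec_mapType type device out) := by unfold Spec_mapType; infer_instance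

-- ===== CLAIM (what is proved, stated in full; the proofs are below) =====
def Claim_equal_mapType : Prop := ∀ (type : Option String) (device : Option String), Dom_mapType type device → Spec_mapType type device (mapType type device)

-- ===== LEMMAS AND PROOFS =====

-- the flattened (alias, key) pairs of a map, in order: A's scan over m is a last-match fold over these pairs
-- inner tuple: fold over (v, k) pairs with a constant key k is a membership test
theorem foldl_pairs_const (vs : List (Option String)) (k : String) (x : Option String) :
    ∀ r : Option String,
      (vs.map (fun v => (v, k))).foldl (fun r p => if p.1 = x then some p.2 else r) r
        = if x ∈ vs then some k else r := by
  induction vs with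
  | nil => intro r; simp
  | cons v vs ihv =>
    intro r
    simp only [List.map_cons, List.foldl_cons, List.mem_cons]
    rw [ihv]
    by_cases hx : x ∈ vs <;> by_cases hv : x = v <;> simp [hx, hv, eq_comm]

theorem scan_eq_foldl_flat (m : List (String × List (Option String))) (x : Option String) :
    ∀ r : Option String,
      m.foldl (fun r kv => if x ∈ kv.2 then some kv.1 else r) r
        = (m.flatMap (fun kv => kv.2.map (fun v => (v, kv.1)))).foldl
            (fun r p => if p.1 = x then some p.2 else r) r := by
  induction m with
  | nil => intro r; simp
  | cons kv m ih =>
    intro r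
    simp only [List.foldl_cons, List.flatMap_cons, List.foldl_append]
    rw [foldl_pairs_const, ih]

-- if x is not a key of L, the last-match fold leaves the accumulator unchanged
theorem foldl_of_not_mem_keys (L : List (Option String × String)) (x : Option String)
    (h : x ∉ L.map Prod.fst) :
    ∀ r : Option String, L.foldl (fun r p => if p.1 = x then some p.2 else r) r = r := by
  induction L with
  | nil => intro r; simp
  | cons p L ih =>
    intro r
    simp only [List.map_cons, List.mem_cons] at h
    have h1 : ¬ p.1 = x := fun he => h (Or.inl he.symm)
    have h2 : x ∉ L.map Prod.fst := fun hm => h (Or.inr hm)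
    rw [List.foldl_cons, if_neg h1]
    exact ih h2 r

-- with pairwise-distinct keys, last match = first match = dict-literal lookup
theorem foldl_eq_get?_of_nodup (L : List (Option String × String)) (x : Option String)
    (h : (L.map Prod.fst).Nodup) :
    L.foldl (fun r p => if p.1 = x then some p.2 else r) none = (PySem.Dict.mk L).get? x := by
  induction L with
  | nil => simp [PySem.Dict.get?]
  | cons p L ih =>
    simp only [List.map_cons, List.nodup_cons] at h
    rw [PySem.Dict.get?_mk_cons, List.foldl_cons]
    by_cases hp : p.1 = x
    · subst hp
      simp only [beq_self_eq_true, if_pos]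
      exact foldl_of_not_mem_keys L p.1 h.1 _
    · rw [if_neg hp, if_neg (by simpa using fun he => hp he), ih h.2]

theorem scan_type (x : Option String) : scanMap typeMapL x = reverseType.get? x := by
  rw [scanMap, scan_eq_foldl_flat,
      show typeMapL.flatMap (fun kv => kv.2.map (fun v => (v, kv.1))) = reverseTypeL from by decide]
  exact foldl_eq_get?_of_nodup reverseTypeL x (by decide)

theorem scan_device (x : Option String) : scanMap deviceMapL x = reverseDevice.get? x := by
  rw [scanMap, scan_eq_foldl_flat,
      show deviceMapL.flatMap (fun kv => kv.2.map (fun v => (v, kv.1))) = reverseDeviceL from by decide]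
  exact foldl_eq_get?_of_nodup reverseDeviceL x (by decide)

-- ===== VERDICT (by name: the statement is the Claim_ definition above) =====
theorem mapType_spec : Claim_equal_mapType := by
  intro type device _
  unfold Spec_mapType mapType mapType_alt
  rw [scan_type, scan_device]
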